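-- pv_equiv track=rewrite | github.com/kiryong-lee/Algorithm | programmers/12973.py | solution
-- ===== SOURCE A (Python) =====
-- def solution(s):
--     stack = []
--     for c in s:
--         if stack == [] or stack[-1] != c:
--             stack.append(c)
--         elif stack[-1] == c:
--             stack.pop()
--
--     if stack == []:
--         return 1
--     else:
--         return 0
-- ===== SOURCE B (Python) =====
-- def _find_pair(chars):
--     for i in range(len(chars) - 1):
--         if chars[i] == chars[i + 1]:
--             return i
--     return None
--
--
-- def solution(s):
--     chars = list(s)
--     while True:
--         i = _find_pair(chars)
--         if i is None:
--             return 1 if not chars else 0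
--         del chars[i:i + 2]
-- ===== Notes on version B (the rewrite author's own statement) =====
-- stated objective: alternative
-- what changed: Replaces the one-pass stack with a rewrite-to-fixpoint loop: repeatedly scan for the first adjacent equal pair and delete it until no pair remains, then test emptiness.
import Mathlib
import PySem

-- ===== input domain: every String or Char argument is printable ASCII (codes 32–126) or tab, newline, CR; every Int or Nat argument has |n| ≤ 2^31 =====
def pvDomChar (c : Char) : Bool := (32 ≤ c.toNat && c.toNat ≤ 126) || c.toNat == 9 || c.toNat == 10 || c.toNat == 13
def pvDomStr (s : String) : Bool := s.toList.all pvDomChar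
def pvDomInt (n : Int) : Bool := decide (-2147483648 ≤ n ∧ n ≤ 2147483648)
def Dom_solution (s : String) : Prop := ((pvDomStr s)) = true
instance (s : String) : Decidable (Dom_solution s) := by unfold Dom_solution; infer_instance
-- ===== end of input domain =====

-- B replaces A's one-pass stack with a delete-first-adjacent-pair-until-fixpoint rewrite loop; equal return value proved for all strings.

-- ===== PORT A =====
-- one loop step of A: push c unless it equals the top of the stack, else pop
def stepA (stack : List Char) (c : Char) : List Char :=
  if stack = [] ∨ stack.getLast? ≠ some c then stack ++ [c]
  else if stack.getLast? = some c then stack.dropLast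
  else stack

def solution (s : String) : Int :=
  let stack := s.toList.foldl stepA []
  if stack = [] then 1 else 0

-- ===== PORT B =====
-- _find_pair: index of the first adjacent equal pair, scanning left to right
def findPair : List Char → Option Nat
  | a :: b :: t => if a = b then some 0 else (findPair (b :: t)).map (· + 1)
  | _ => none

theorem findPair_lt : ∀ {l : List Char} {i : Nat}, findPair l = some i → i + 1 < l.length := by
  intro l
  induction l with
  | nil => intro i h; simp [findPair] at h
  | cons a t ih =>
    intro i h
    cases t with
    | nil => simp [findPair] at h
    | cons b t' =>
      by_cases hab : a = b
      · simp [findPair, hab] at h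
        subst h; simp
      · simp [findPair, hab] at h
        obtain ⟨j, hj, hji⟩ := h
        have := ih hj
        simp at this ⊢
        omega

-- the while loop of B: delete chars[i:i+2] at the first pair until none is found
def reduceB (l : List Char) : List Char :=
  match h : findPair l with
  | some i => reduceB (l.take i ++ l.drop (i + 2))
  | none => l
termination_by l.length
decreasing_by
  have := findPair_lt h
  simp [List.length_take, List.length_drop]
  omega

def solution_alt (s : String) : Int :=
  if reduceB s.toList = [] then 1 else 0

-- ===== PRECONDITION & SPEC =====
def Spec_solution (s : String) (out : Int) : Prop := out = solution_alt s
instance (s : String) (out : Int) : Decidable (Spec_solution s out) := by unfold Spec_solution; infer_instance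

-- ===== CLAIM (what is proved, stated in full; the proofs are below) =====
def Claim_equal_solution : Prop := ∀ (s : String), Dom_solution s → Spec_solution s (solution s)

-- ===== LEMMAS AND PROOFS =====

-- reversed-stack version of A's loop step, used only for the proof
def rstep (r : List Char) (c : Char) : List Char :=
  if r = [] ∨ r.head? ≠ some c then c :: r
  else if r.head? = some c then r.tail
  else r

theorem stepA_eq_rstep (st : List Char) (c : Char) :
    stepA st c = (rstep st.reverse c).reverse := by
  cases st using List.reverseRecOn with
  | nil => simp [stepA, rstep]
  | append_singleton t a _ =>
    by_cases hac : a = c <;>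
      simp [stepA, rstep, hac]

theorem foldl_stepA_eq (l : List Char) : ∀ (st : List Char),
    l.foldl stepA st = (l.foldl rstep st.reverse).reverse := by
  induction l with
  | nil => simp
  | cons a t ih =>
    intro st
    simp only [List.foldl_cons, stepA_eq_rstep, ih, List.reverse_reverse]

theorem rstep_chain {r : List Char} (hr : r.IsChain (· ≠ ·)) (c : Char) :
    (rstep r c).IsChain (· ≠ ·) := by
  cases r with
  | nil => simp [rstep, List.isChain_singleton]
  | cons a t =>
    by_cases hac : a = c
    · subst hac
      simpa [rstep] using List.isChain_of_isChain_cons hr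
    · have hp : rstep (a :: t) c = c :: a :: t := by simp [rstep, hac]
      rw [hp]
      exact List.isChain_cons_cons.mpr ⟨Ne.symm hac, hr⟩

theorem rstep_rstep {r : List Char} (hr : r.IsChain (· ≠ ·)) (c : Char) :
    rstep (rstep r c) c = r := by
  cases r with
  | nil => simp [rstep]
  | cons a t =>
    by_cases hac : a = c
    · subst hac
      cases t with
      | nil => simp [rstep]
      | cons b t' =>
        have hab : a ≠ b := List.rel_of_isChain_cons_cons hr
        simp [rstep, Ne.symm hab]
    · simp [rstep, hac]

theorem rfold_pair {v : List Char} (c : Char) : ∀ (u r : List Char), r.IsChain (· ≠ ·) →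
    (u ++ c :: c :: v).foldl rstep r = (u ++ v).foldl rstep r := by
  intro u
  induction u with
  | nil =>
    intro r hr
    simp [rstep_rstep hr]
  | cons a t ih =>
    intro r hr
    simpa using ih (rstep r a) (rstep_chain hr a)

theorem take_cc_drop : ∀ {l : List Char} {i : Nat}, findPair l = some i →
    ∃ c, l = l.take i ++ c :: c :: l.drop (i + 2) := by
  intro l
  induction l with
  | nil => intro i h; simp [findPair] at h
  | cons a t ih =>
    intro i h
    cases t with
    | nil => simp [findPair] at h
    | cons b t' =>
      by_cases hab : a = b
      · simp [findPair, hab] at h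
        subst h hab
        exact ⟨a, by simp⟩
      · simp [findPair, hab] at h
        obtain ⟨j, hj, hji⟩ := h
        obtain ⟨c, hc⟩ := ih hj
        subst hji
        exact ⟨c, by simpa [List.take_succ_cons, List.drop_succ_cons] using congrArg (a :: ·) hc⟩

theorem rfold_reduceB : ∀ (l : List Char), l.foldl rstep [] = (reduceB l).foldl rstep [] := by
  intro l
  induction l using reduceB.induct with
  | case1 l i h ih =>
    obtain ⟨c, hc⟩ := take_cc_drop h
    rw [reduceB, h]
    calc l.foldl rstep [] = (l.take i ++ c :: c :: l.drop (i + 2)).foldl rstep [] := by rw [← hc]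
      _ = (l.take i ++ l.drop (i + 2)).foldl rstep [] := rfold_pair c _ [] List.isChain_nil
      _ = (reduceB (l.take i ++ l.drop (i + 2))).foldl rstep [] := ih
  | case2 l h => rw [reduceB, h]

theorem findPair_none_chain : ∀ {l : List Char}, findPair l = none → l.IsChain (· ≠ ·) := by
  intro l
  induction l with
  | nil => intro _; exact List.isChain_nil
  | cons a t ih =>
    intro h
    cases t with
    | nil => exact List.isChain_singleton a
    | cons b t' =>
      by_cases hab : a = b
      · simp [findPair, hab] at h
      · simp [findPair, hab] at h
        exact List.isChain_cons_cons.mpr ⟨hab, ih h⟩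

theorem reduceB_fix (l : List Char) : findPair (reduceB l) = none := by
  induction l using reduceB.induct with
  | case1 l i h ih => rw [reduceB, h]; exact ih
  | case2 l h => rw [reduceB, h]; exact h

theorem chain_rfold : ∀ (l r : List Char), l.IsChain (· ≠ ·) → r.IsChain (· ≠ ·) →
    (∀ a b, r.head? = some a → l.head? = some b → a ≠ b) →
    l.foldl rstep r = l.reverse ++ r := by
  intro l
  induction l with
  | nil => simp
  | cons b t ih =>
    intro r hl hr hne
    have hpush : rstep r b = b :: r := by
      cases r with
      | nil => simp [rstep]
      | cons a t' =>
        have : a ≠ b := hne a b rfl rfl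
        simp [rstep, this]
    have hbr : (b :: r).IsChain (· ≠ ·) := by
      cases r with
      | nil => exact List.isChain_singleton b
      | cons x t'' =>
        exact List.isChain_cons_cons.mpr ⟨Ne.symm (hne x b rfl rfl), hr⟩
    rw [List.foldl_cons, hpush,
      ih (b :: r) (List.isChain_of_isChain_cons hl) hbr
        (fun a c ha hc => by
          simp at ha; subst ha
          cases t with
          | nil => simp at hc
          | cons d t' =>
            simp at hc; subst hc
            exact List.rel_of_isChain_cons_cons hl)]
    simp

-- ===== VERDICT (by name: the statement is the Claim_ definition above) =====
theorem solution_spec : Claim_equal_solution := by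
  intro s _
  unfold Spec_solution solution solution_alt
  rw [foldl_stepA_eq]
  have hchain := findPair_none_chain (reduceB_fix s.toList)
  rw [List.reverse_nil, rfold_reduceB,
    chain_rfold _ [] hchain List.isChain_nil (by simp)]
  simp
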